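-- pv_equiv track=rewrite | github.com/ZProLegend007/AppleTVRemote-GUI | unified_launcher.py | _parse_atvremote_scan_output
-- ===== SOURCE A (Python) =====
-- def _parse_atvremote_scan_output(output):
--     """Parse atvremote scan output properly"""
--     devices = []
--     current_device = {}
--
--     for line in output.strip().split('\n'):
--         line = line.strip()
--         if line == '----' or line == '':
--             if current_device:
--                 devices.append(current_device)
--                 current_device = {}
--         elif ':' in line:
--             key, value = line.split(':', 1)
--             current_device[key.strip()] = value.strip()
--
--     if current_device:
--         devices.append(current_device)
--
--     return devices
-- ===== SOURCE B (Python) =====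
-- def _parse_atvremote_scan_output(output):
--     """Parse atvremote scan output: split into separator-delimited runs first, then build one dict per run."""
--     lines = [l.strip() for l in output.strip().split('\n')]
--     n = len(lines)
--     devices = []
--     i = 0
--     while i < n:
--         if lines[i] in ('----', ''):
--             i += 1
--             continue
--         j = i
--         while j < n and lines[j] not in ('----', ''):
--             j += 1
--         device = {}
--         for line in lines[i:j]:
--             if ':' in line:
--                 key, value = line.split(':', 1)
--                 device[key.strip()] = value.strip()
--         if device:
--             devices.append(device)
--         i = j
--     return devices
-- ===== Notes on version B (the rewrite author's own statement) =====
-- stated objective: alternative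
-- what changed: Replaces A's single-pass flush-on-separator state machine (mutable current dict flushed whenever a separator/blank line arrives and once more at the end) by a two-phase decomposition: pre-strip all lines, cut the line list into maximal separator-free runs with a two-pointer scan, then build one dict per run and keep the non-empty ones.
import Mathlib
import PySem

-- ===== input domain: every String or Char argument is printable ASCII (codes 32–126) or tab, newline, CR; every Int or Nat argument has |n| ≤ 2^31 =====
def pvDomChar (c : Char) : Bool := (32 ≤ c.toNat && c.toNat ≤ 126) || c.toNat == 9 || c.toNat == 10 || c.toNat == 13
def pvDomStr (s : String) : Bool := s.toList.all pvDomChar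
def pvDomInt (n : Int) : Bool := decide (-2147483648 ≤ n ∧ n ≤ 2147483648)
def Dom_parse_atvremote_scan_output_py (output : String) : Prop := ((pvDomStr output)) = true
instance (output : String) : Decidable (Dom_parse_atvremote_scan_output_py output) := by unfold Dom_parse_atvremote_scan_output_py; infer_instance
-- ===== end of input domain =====

-- B re-decomposes A's single-pass flush-on-separator state machine into: pre-strip all lines, cut the
-- list into maximal separator-free runs (two-pointer scan), then build one dict per run (objective: alternative).

-- ===== PORT A =====
-- per-line dict update: "elif ':' in line: key, value = line.split(':', 1); current_device[...] = ..."
-- (split on the nonempty sep ':' with maxsplit 1 always yields exactly two pieces when ':' occurs;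
--  the catch-all match arm is unreachable)
def pvStep (d : PySem.Dict String String) (line : String) : PySem.Dict String String :=
  if PySem.Str.isIn ":" line then
    match PySem.Str.splitMax? line ":" 1 with
    | some [k, v] => d.insert (PySem.Str.strip k) (PySem.Str.strip v)
    | _ => d
  else d

-- A's loop body, state = (devices so far, current device dict)
def pvStepA (acc : List (List (String × String)) × PySem.Dict String String) (rawLine : String) :
    List (List (String × String)) × PySem.Dict String String :=
  let line := PySem.Str.strip rawLine
  if line = "----" ∨ line = "" then
    if acc.2.items ≠ [] then (acc.1 ++ [acc.2.items], PySem.Dict.empty) else acc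
  else (acc.1, pvStep acc.2 line)

-- split? on the literal separator "\n" is always `some`; `.getD []` only discharges the Option
def parse_atvremote_scan_output_py (output : String) : List (List (String × String)) :=
  let st := ((PySem.Str.split? (PySem.Str.strip output) "\n").getD []).foldl
    pvStepA ([], PySem.Dict.empty)
  if st.2.items ≠ [] then st.1 ++ [st.2.items] else st.1

-- ===== PORT B =====
-- lines[i] in ('----', '')  (applied to already-stripped lines)
def pvIsSep (l : String) : Bool := l = "----" || l = ""

-- the inner "for line in lines[i:j]" dict-building loop
def pvBuildDevice (run : List String) : PySem.Dict String String :=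
  run.foldl pvStep PySem.Dict.empty

-- the outer two-pointer while loop: skip separator lines, scan each maximal separator-free run
def pvRuns : List String → List (List String)
  | [] => []
  | l :: ls =>
    if pvIsSep l then pvRuns ls
    else (l :: ls.takeWhile (fun x => !pvIsSep x)) :: pvRuns (ls.dropWhile (fun x => !pvIsSep x))
  termination_by ls => ls.length
  decreasing_by
    · simp
    · exact Nat.lt_succ_of_le (List.length_dropWhile_le _ _)

def parse_atvremote_scan_output_py_alt (output : String) : List (List (String × String)) :=
  let lines := ((PySem.Str.split? (PySem.Str.strip output) "\n").getD []).map PySem.Str.strip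
  (pvRuns lines).filterMap (fun run =>
    let d := pvBuildDevice run
    if d.items = [] then none else some d.items)

-- ===== PRECONDITION & SPEC =====
def Spec_parse_atvremote_scan_output_py (output : String) (out : List (List (String × String))) : Prop := out = parse_atvremote_scan_output_py_alt output
instance (output : String) (out : List (List (String × String))) : Decidable (Spec_parse_atvremote_scan_output_py output out) := by unfold Spec_parse_atvremote_scan_output_py; infer_instance

-- ===== CLAIM (what is proved, stated in full; the proofs are below) =====
def Claim_equal_parse_atvremote_scan_output_py : Prop := ∀ (output : String), Dom_parse_atvremote_scan_output_py output → Spec_parse_atvremote_scan_output_py output (parse_atvremote_scan_output_py output)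

-- ===== LEMMAS AND PROOFS =====

def pvFlush (d : PySem.Dict String String) : List (List (String × String)) :=
  if d.items = [] then [] else [d.items]

def pvDevicesOf (runs : List (List String)) : List (List (String × String)) :=
  runs.filterMap (fun run =>
    let d := pvBuildDevice run
    if d.items = [] then none else some d.items)

-- "rest of A's output" produced from the remaining lines ls, starting from current dict cur
def pvEmit (ls : List String) (cur : PySem.Dict String String) : List (List (String × String)) :=
  let st := ls.foldl pvStepA ([], cur)
  if st.2.items ≠ [] then st.1 ++ [st.2.items] else st.1

theorem pvFoldA_fst (ls : List String) (devices : List (List (String × String)))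
    (cur : PySem.Dict String String) :
    ls.foldl pvStepA (devices, cur) =
      (devices ++ (ls.foldl pvStepA ([], cur)).1, (ls.foldl pvStepA ([], cur)).2) := by
  induction ls generalizing devices cur with
  | nil => simp
  | cons l ls ih =>
    have hstep : ∀ (ds : List (List (String × String))) (c : PySem.Dict String String),
        pvStepA (ds, c) l = (ds ++ (pvStepA ([], c) l).1, (pvStepA ([], c) l).2) := by
      intro ds c
      unfold pvStepA
      by_cases hs : (PySem.Str.strip l = "----" ∨ PySem.Str.strip l = "")
      · by_cases hi : c.items = [] <;> simp [hs, hi]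
      · simp [hs]
    simp only [List.foldl_cons]
    rw [hstep devices cur, ih]
    conv_rhs => rw [show pvStepA ([], cur) l =
      ((pvStepA ([], cur) l).1, (pvStepA ([], cur) l).2) from rfl, ih]
    simp

theorem pvEmit_nil (cur : PySem.Dict String String) : pvEmit [] cur = pvFlush cur := by
  unfold pvEmit pvFlush
  split_ifs <;> simp_all

theorem pvEmit_cons_sep (l : String) (ls : List String) (cur : PySem.Dict String String)
    (h : pvIsSep (PySem.Str.strip l) = true) :
    pvEmit (l :: ls) cur = pvFlush cur ++ pvEmit ls PySem.Dict.empty := by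
  have h' : PySem.Str.strip l = "----" ∨ PySem.Str.strip l = "" := by
    simpa [pvIsSep] using h
  have hstep : pvStepA ([], cur) l = (pvFlush cur, PySem.Dict.empty) := by
    unfold pvStepA pvFlush
    by_cases hc : cur.items = []
    · have hce : cur = PySem.Dict.empty := by
        apply PySem.Dict.ext; simpa using hc
      simp [h', hce, show (PySem.Dict.empty : PySem.Dict String String).items = [] from rfl]
    · simp [h', hc]
  unfold pvEmit
  simp only [List.foldl_cons, hstep]
  rw [pvFoldA_fst]
  split_ifs <;> simp_all

theorem pvEmit_cons_content (l : String) (ls : List String) (cur : PySem.Dict String String)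
    (h : pvIsSep (PySem.Str.strip l) = false) :
    pvEmit (l :: ls) cur = pvEmit ls (pvStep cur (PySem.Str.strip l)) := by
  have h' : ¬ (PySem.Str.strip l = "----" ∨ PySem.Str.strip l = "") := by
    simpa [pvIsSep] using h
  have hstep : pvStepA ([], cur) l = ([], pvStep cur (PySem.Str.strip l)) := by
    unfold pvStepA
    simp [h']
  unfold pvEmit
  simp only [List.foldl_cons, hstep]

theorem pvDevicesOf_runs (ls : List String) :
    pvDevicesOf (pvRuns ls) =
      pvFlush ((ls.takeWhile (fun x => !pvIsSep x)).foldl pvStep PySem.Dict.empty) ++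
        pvDevicesOf (pvRuns (ls.dropWhile (fun x => !pvIsSep x))) := by
  cases ls with
  | nil =>
    simp [pvRuns, pvDevicesOf, pvFlush,
      show (PySem.Dict.empty : PySem.Dict String String).items = [] from rfl]
  | cons l ls =>
    by_cases h : pvIsSep l
    · simp only [List.takeWhile_cons, List.dropWhile_cons, h, Bool.not_true,
        Bool.false_eq_true, if_neg, not_false_eq_true, List.foldl_nil]
      rw [show pvRuns (l :: ls) = pvRuns ls from by rw [pvRuns]; simp [h]]
      simp [pvFlush, show (PySem.Dict.empty : PySem.Dict String String).items = [] from rfl]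
    · have h0 : pvIsSep l = false := by simpa using h
      rw [show pvRuns (l :: ls) =
          (l :: ls.takeWhile (fun x => !pvIsSep x)) ::
            pvRuns (ls.dropWhile (fun x => !pvIsSep x)) from by rw [pvRuns]; simp [h0]]
      simp only [pvDevicesOf, List.filterMap_cons, List.takeWhile_cons, List.dropWhile_cons,
        h0, Bool.not_false, if_pos, pvBuildDevice, pvFlush, List.foldl_cons]
      split_ifs <;> simp

theorem pvEmit_eq (ls : List String) (cur : PySem.Dict String String) :
    pvEmit ls cur =
      pvFlush ((ls.takeWhile (fun x => !pvIsSep (PySem.Str.strip x))).foldl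
          (fun d x => pvStep d (PySem.Str.strip x)) cur) ++
        pvDevicesOf (pvRuns ((ls.dropWhile (fun x => !pvIsSep (PySem.Str.strip x))).map
          PySem.Str.strip)) := by
  induction ls generalizing cur with
  | nil => simp [pvEmit_nil, pvRuns, pvDevicesOf]
  | cons l ls ih =>
    by_cases h : pvIsSep (PySem.Str.strip l) = true
    · rw [pvEmit_cons_sep l ls cur h, ih PySem.Dict.empty]
      simp only [List.takeWhile_cons, List.dropWhile_cons, h, Bool.not_true,
        Bool.false_eq_true, if_neg, not_false_eq_true, List.foldl_nil, List.map_cons]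
      rw [show pvRuns (PySem.Str.strip l :: ls.map PySem.Str.strip) =
          pvRuns (ls.map PySem.Str.strip) from by rw [pvRuns]; simp [h]]
      rw [pvDevicesOf_runs (ls.map PySem.Str.strip)]
      rw [List.takeWhile_map, List.dropWhile_map, List.foldl_map]
      simp only [Function.comp_def]
    · have h0 : pvIsSep (PySem.Str.strip l) = false := by simpa using h
      rw [pvEmit_cons_content l ls cur h0, ih]
      simp [h0]

theorem pvMain (output : String) :
    parse_atvremote_scan_output_py output = parse_atvremote_scan_output_py_alt output := by
  show pvEmit ((PySem.Str.split? (PySem.Str.strip output) "\n").getD []) PySem.Dict.empty =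
    pvDevicesOf (pvRuns (((PySem.Str.split? (PySem.Str.strip output) "\n").getD []).map
      PySem.Str.strip))
  rw [pvEmit_eq]
  rw [pvDevicesOf_runs ((((PySem.Str.split? (PySem.Str.strip output) "\n").getD [])).map
    PySem.Str.strip)]
  rw [List.takeWhile_map, List.dropWhile_map, List.foldl_map]
  simp only [Function.comp_def]

-- ===== VERDICT (by name: the statement is the Claim_ definition above) =====
theorem parse_atvremote_scan_output_py_spec : Claim_equal_parse_atvremote_scan_output_py := by
  intro output _
  exact pvMain output
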